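-- pv_equiv track=rewrite | github.com/Tukan322/OpenCVLaser | Main.py | split_boxes
-- ===== SOURCE A (Python) =====
-- def split_boxes(boxxx, w):
--     ret_box = []
--     n_w = 15
--     blank = 7
--     y_u = boxxx[0][1]
--     y_d = boxxx[2][1]
--     l_up = boxxx[0][0]
--     l_down = boxxx[3][0]
--     r_up = boxxx[0][0] + n_w
--     r_down = boxxx[3][0] + n_w
--     if w < 15:
--         ret_box.append([[boxxx[0][0], boxxx[0][1]],
--                         [boxxx[1][0], boxxx[1][1]],
--                         [boxxx[2][0], boxxx[2][1]],
--                         [boxxx[3][0], boxxx[3][1]]])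
--         w = 0
--     while w > 0:
--         ret_box.append([[l_up, y_u],
--                         [r_up, y_u],
--                         [r_down, y_d],
--                         [l_down, y_d]])
--         w -= 25
--         l_up += n_w + blank
--         r_up += n_w + blank
--         r_down += n_w + blank
--         l_down += n_w + blank
--
--     return ret_box
-- ===== SOURCE B (Python) =====
-- def split_boxes(boxxx, w):
--     y_u = boxxx[0][1]
--     y_d = boxxx[2][1]
--     lu = boxxx[0][0]
--     ld = boxxx[3][0]
--     if w < 15:
--         return [[p[:2] for p in boxxx[:4]]]
--     n = (w + 24) // 25
--     return [[[lu + 22 * i, y_u],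
--              [lu + 15 + 22 * i, y_u],
--              [ld + 15 + 22 * i, y_d],
--              [ld + 22 * i, y_d]] for i in range(n)]
-- ===== Notes on version B (the rewrite author's own statement) =====
-- stated objective: simpler
-- what changed: Replaces the while loop with four mutated coordinate accumulators by precomputing the box count n = (w+24)//25 and emitting each box directly from closed-form index arithmetic base + 22*i in a comprehension.
import Mathlib
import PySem

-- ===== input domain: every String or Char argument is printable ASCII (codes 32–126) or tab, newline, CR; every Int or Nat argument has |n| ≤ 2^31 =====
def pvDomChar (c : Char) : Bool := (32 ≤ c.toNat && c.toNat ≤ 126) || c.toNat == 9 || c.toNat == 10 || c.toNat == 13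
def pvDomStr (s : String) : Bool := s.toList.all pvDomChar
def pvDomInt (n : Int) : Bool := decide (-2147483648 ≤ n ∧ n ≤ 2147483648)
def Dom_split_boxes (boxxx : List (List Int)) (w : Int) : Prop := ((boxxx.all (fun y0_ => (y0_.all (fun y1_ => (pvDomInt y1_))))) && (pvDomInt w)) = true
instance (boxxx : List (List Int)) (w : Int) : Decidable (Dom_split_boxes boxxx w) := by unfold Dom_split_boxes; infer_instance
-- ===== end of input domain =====

-- B replaces A's while loop with four mutated accumulators by a precomputed box
-- count and closed-form index arithmetic in a comprehension (objective: simpler).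

-- ===== PORT A =====
-- the while loop of A: appends a box, shifts all four x-accumulators by n_w+blank, decrements w by 25
def splitA_loop (y_u y_d l_up r_up r_down l_down w : Int)
    (acc : List (List (List Int))) : List (List (List Int)) :=
  if _ : w > 0 then
    splitA_loop y_u y_d (l_up + (15 + 7)) (r_up + (15 + 7)) (r_down + (15 + 7)) (l_down + (15 + 7))
      (w - 25)
      (acc ++ [[[l_up, y_u], [r_up, y_u], [r_down, y_d], [l_down, y_d]]])
  else acc
  termination_by w.toNat
  decreasing_by omega

def split_boxes (boxxx : List (List Int)) (w : Int) : List (List (List Int)) :=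
  let n_w : Int := 15
  let y_u := PySem.List.pyGetD (PySem.List.pyGetD boxxx 0 []) 1 0
  let y_d := PySem.List.pyGetD (PySem.List.pyGetD boxxx 2 []) 1 0
  let l_up := PySem.List.pyGetD (PySem.List.pyGetD boxxx 0 []) 0 0
  let l_down := PySem.List.pyGetD (PySem.List.pyGetD boxxx 3 []) 0 0
  let r_up := PySem.List.pyGetD (PySem.List.pyGetD boxxx 0 []) 0 0 + n_w
  let r_down := PySem.List.pyGetD (PySem.List.pyGetD boxxx 3 []) 0 0 + n_w
  if w < 15 then
    -- the special box is appended and w set to 0, so the loop runs zero times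
    splitA_loop y_u y_d l_up r_up r_down l_down 0
      [[[PySem.List.pyGetD (PySem.List.pyGetD boxxx 0 []) 0 0, PySem.List.pyGetD (PySem.List.pyGetD boxxx 0 []) 1 0],
        [PySem.List.pyGetD (PySem.List.pyGetD boxxx 1 []) 0 0, PySem.List.pyGetD (PySem.List.pyGetD boxxx 1 []) 1 0],
        [PySem.List.pyGetD (PySem.List.pyGetD boxxx 2 []) 0 0, PySem.List.pyGetD (PySem.List.pyGetD boxxx 2 []) 1 0],
        [PySem.List.pyGetD (PySem.List.pyGetD boxxx 3 []) 0 0, PySem.List.pyGetD (PySem.List.pyGetD boxxx 3 []) 1 0]]]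
  else
    splitA_loop y_u y_d l_up r_up r_down l_down w []

-- ===== PORT B =====
def split_boxes_alt (boxxx : List (List Int)) (w : Int) : List (List (List Int)) :=
  let y_u := PySem.List.pyGetD (PySem.List.pyGetD boxxx 0 []) 1 0
  let y_d := PySem.List.pyGetD (PySem.List.pyGetD boxxx 2 []) 1 0
  let lu := PySem.List.pyGetD (PySem.List.pyGetD boxxx 0 []) 0 0
  let ld := PySem.List.pyGetD (PySem.List.pyGetD boxxx 3 []) 0 0
  if w < 15 then
    [(PySem.List.slice boxxx none (some 4)).map (fun p => PySem.List.slice p none (some 2))]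
  else
    let n := PySem.Int.floordiv (w + 24) 25
    (PySem.List.pyRange 0 n 1).map (fun i =>
      [[lu + 22 * i, y_u], [lu + 15 + 22 * i, y_u], [ld + 15 + 22 * i, y_d], [ld + 22 * i, y_d]])

-- ===== PRECONDITION & SPEC =====
-- exactly the inputs where the Python A returns (otherwise an IndexError on one of its subscripts)
def Pre_split_boxes (boxxx : List (List Int)) (w : Int) : Prop :=
  4 ≤ boxxx.length ∧ 2 ≤ (boxxx.getD 0 []).length ∧ 2 ≤ (boxxx.getD 2 []).length ∧
    1 ≤ (boxxx.getD 3 []).length ∧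
    (w < 15 → 2 ≤ (boxxx.getD 1 []).length ∧ 2 ≤ (boxxx.getD 3 []).length)
instance (boxxx : List (List Int)) (w : Int) : Decidable (Pre_split_boxes boxxx w) := by
  unfold Pre_split_boxes; infer_instance
def pvWitness_split_boxes : List (List Int) × Int := ([[0, 0], [15, 0], [15, 9], [0, 9]], 40)

def Spec_split_boxes (boxxx : List (List Int)) (w : Int) (out : List (List (List Int))) : Prop := out = split_boxes_alt boxxx w
instance (boxxx : List (List Int)) (w : Int) (out : List (List (List Int))) : Decidable (Spec_split_boxes boxxx w out) := by unfold Spec_split_boxes; infer_instance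

-- ===== CLAIM (what is proved, stated in full; the proofs are below) =====
def Claim_equal_split_boxes : Prop := ∀ (boxxx : List (List Int)) (w : Int), Dom_split_boxes boxxx w → Pre_split_boxes boxxx w → Spec_split_boxes boxxx w (split_boxes boxxx w)

-- ===== LEMMAS AND PROOFS =====

-- the loop, from any state, appends exactly ⌈w/25⌉ boxes at closed-form offsets 22*k
lemma splitA_loop_eq (y_u y_d : Int) :
    ∀ (m : Nat) (w : Int), w.toNat = m → ∀ (lu ru rd ld : Int) (acc : List (List (List Int))),
      splitA_loop y_u y_d lu ru rd ld w acc =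
        acc ++ (List.range (PySem.Int.floordiv (w + 24) 25).toNat).map
          (fun (k : Nat) => [[lu + 22 * (k : Int), y_u], [ru + 22 * (k : Int), y_u],
                     [rd + 22 * (k : Int), y_d], [ld + 22 * (k : Int), y_d]]) := by
  intro m
  induction m using Nat.strong_induction_on with
  | _ m ih =>
    intro w hw lu ru rd ld acc
    rw [splitA_loop]
    split_ifs with hpos
    · rw [ih (w - 25).toNat (by omega) (w - 25) rfl]
      have h25 : (0:Int) < 25 := by decide
      rw [PySem.Int.floordiv_eq_ediv_of_pos h25, PySem.Int.floordiv_eq_ediv_of_pos h25]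
      have hnn : ((w + 24) / 25).toNat = ((w - 25 + 24) / 25).toNat + 1 := by omega
      rw [hnn, List.range_succ_eq_map, List.map_cons, List.map_map, List.append_assoc]
      simp only [List.singleton_append, Nat.cast_zero]
      congr 1
      norm_num
      intro a _
      omega
    · have : ((w + 24) / 25 : Int).toNat = 0 := by omega
      rw [PySem.Int.floordiv_eq_ediv_of_pos (by decide), this]
      simp

-- ===== VERDICT (by name: the statement is the Claim_ definition above) =====
set_option maxHeartbeats 1000000 in
theorem split_boxes_spec : Claim_equal_split_boxes := by
  intro boxxx w _ hPre
  obtain ⟨hlen, h0, h2, h3, h15⟩ := hPre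
  unfold Spec_split_boxes
  simp only [split_boxes, split_boxes_alt]
  split_ifs with hw
  · -- special-case branch: destructure boxxx into four rows of length ≥ 2 (resp. ≥ 1)
    obtain ⟨hb1, hb3⟩ := h15 hw
    match boxxx, hlen with
    | b0 :: b1 :: b2 :: b3 :: rest, _ =>
      simp only [List.getD, List.getElem?_cons_zero, List.getElem?_cons_succ, Option.getD_some] at h0 hb1 h2 hb3
      match b0, h0 with
      | x0 :: y0 :: t0, _ =>
        match b1, hb1 with
        | x1 :: y1 :: t1, _ =>
          match b2, h2 with
          | x2 :: y2 :: t2, _ =>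
            match b3, hb3 with
            | x3 :: y3 :: t3, _ =>
              rw [splitA_loop]
              norm_num
              simp [pysem, PySem.List.slice]
  · rw [splitA_loop_eq _ _ w.toNat w rfl, PySem.List.pyRange_one]
    simp only [List.nil_append, List.map_map, sub_zero, zero_add]
    apply List.map_congr_left
    intro k _
    norm_num
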